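-- pv_equiv track=rewrite | github.com/makeabilitylab/signals | Tutorials/makelab/signal.py | calc_zero_crossings
-- ===== SOURCE A (Python) =====
-- def calc_zero_crossings(s, min_gap = None):
--     '''Returns the number of zero crossings in the signal s
--
--     This method is based on https://stackoverflow.com/q/3843017
--
--     Parameters:
--     s: the signal
--     min_gap: the minimum gap (in samples) between zero crossings
--     TODO:
--     - could have a mininum height after the zero crossing (within some window) to eliminate noise
--     '''
--     # I could not get the speedier Pythonista solutions to work reliably so here's a
--     # custom non-Pythony solution
--     cur_pt = s[0]
--     zero_crossings = []
--     last_zero_crossing_idx = None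
--     last_zero_cross_idx_saved = None
--     for i in range(1, len(s)):
--         next_pt = s[i]
--         zero_crossing_idx = None
--
--         # There are three cases to check for:
--         #  1. If the cur_pt is gt zero and the next_pt is lt zero, obviously a zero crossing.
--         #     Similarly, if the next_pt is gt zero and the cut_pt is lt zero, again a zero crossing
--         #  2. If the cur_pt is zero and the next_pt gt zero, then we walk back to see when zero
--         #     was first "entered"
--         #  3. Finally, if the cut_pt is zero and the next_pt lt zero, we again walk back to see
--         #     when zero was first "entered"
--         if ((next_pt < 0 and cur_pt > 0) or (next_pt > 0 and cur_pt < 0)):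
--             # if we're here, a zero crossing occurred
--             zero_crossing_idx = i
--
--         elif cur_pt == 0 and next_pt > 0:
--             # check for previous points less than 0
--             # as soon as tmp_pt is not zero, we are done
--             tmp_pt = cur_pt
--             walk_back_idx = i
--             while(tmp_pt == 0 and walk_back_idx > 0):
--                 walk_back_idx -= 1
--                 tmp_pt = s[walk_back_idx]
--
--             if tmp_pt < 0:
--                 zero_crossing_idx = i
--
--         elif cur_pt == 0 and next_pt < 0:
--             # check for previous points greater than 0
--             # as soon as tmp_pt is not zero, we are done
--             tmp_pt = cur_pt
--             walk_back_idx = i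
--             while(tmp_pt == 0 and walk_back_idx > 0):
--                 walk_back_idx -= 1
--                 tmp_pt = s[walk_back_idx]
--
--             if tmp_pt > 0:
--                 zero_crossing_idx = i
--
--         # now potentially add zero_crossing_idx to our list
--         if zero_crossing_idx is not None:
--             # potentially have a new zero crossing, check for other conditions
--             if last_zero_cross_idx_saved is None or \
--                last_zero_cross_idx_saved is not None and min_gap is None or \
--                (min_gap is not None and (i - last_zero_cross_idx_saved) > min_gap):
--
--                 zero_crossings.append(zero_crossing_idx) # save the zero crossing point
--                 last_zero_cross_idx_saved = zero_crossing_idx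
--
--             last_zero_crossing_idx = zero_crossing_idx
--
--         cur_pt = s[i]
--     return zero_crossings
-- ===== SOURCE B (Python) =====
-- def calc_zero_crossings(s, min_gap=None):
--     """Returns the zero-crossing indices of the signal s, at least min_gap samples apart.
--
--     Single pass: track the sign of the last nonzero sample seen so far;
--     a zero crossing at i is a nonzero sample whose sign is opposite to it."""
--     zero_crossings = []
--     last_saved = None
--     last_sign = 0  # sign of the last nonzero sample before the current one (0 = none yet)
--     for i, x in enumerate(s):
--         if last_sign != 0 and x * last_sign < 0:
--             if last_saved is None or min_gap is None or i - last_saved > min_gap: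
--                 zero_crossings.append(i)
--                 last_saved = i
--         if x != 0:
--             last_sign = 1 if x > 0 else -1
--     return zero_crossings
-- ===== Notes on version B (the rewrite author's own statement) =====
-- stated objective: simpler
-- what changed: Replaces A's three-way case split with a backward walk over runs of zeros by a single forward pass that maintains the sign of the last nonzero sample, so a crossing is just a nonzero sample of opposite sign.
import Mathlib
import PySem

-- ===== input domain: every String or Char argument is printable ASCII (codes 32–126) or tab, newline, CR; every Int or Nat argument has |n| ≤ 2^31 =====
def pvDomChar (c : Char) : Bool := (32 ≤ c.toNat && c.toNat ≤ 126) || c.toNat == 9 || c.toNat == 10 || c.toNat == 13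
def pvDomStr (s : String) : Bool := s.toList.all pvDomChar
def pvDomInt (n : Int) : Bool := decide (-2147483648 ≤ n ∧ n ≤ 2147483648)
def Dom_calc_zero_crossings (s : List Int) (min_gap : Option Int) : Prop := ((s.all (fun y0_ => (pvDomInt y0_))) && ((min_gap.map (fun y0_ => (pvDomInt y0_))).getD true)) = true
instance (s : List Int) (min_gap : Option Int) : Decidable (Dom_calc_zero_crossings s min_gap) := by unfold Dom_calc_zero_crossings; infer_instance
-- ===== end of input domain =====

-- B replaces A's three-way case split with backward walks over zero runs by a single pass tracking the sign of the last nonzero sample (simpler).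


-- ===== PORT A =====
-- A's inner while loop: while tmp_pt == 0 and walk_back_idx > 0: walk_back_idx -= 1; tmp_pt = s[walk_back_idx]
-- (the index is always in range when A runs it, so s[walk_back_idx] is List.getD _ _ 0)
def pvWalk (s : List Int) : Nat → Int → Int
  | 0, t => t
  | k+1, t => if t = 0 then pvWalk s k (s.getD k 0) else t

-- one iteration of A's main for-loop; state = (cur_pt, zero_crossings, last_zero_cross_idx_saved)
-- (last_zero_crossing_idx is assigned but never read in A, so it is not part of the state)
def pvStepA (s : List Int) (min_gap : Option Int) (st : Int × List Int × Option Int)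
    (i : Nat) : Int × List Int × Option Int :=
  let cur := st.1; let zcs := st.2.1; let lastSaved := st.2.2
  let next := s.getD i 0
  let zci : Option Int :=
    if (next < 0 ∧ cur > 0) ∨ (next > 0 ∧ cur < 0) then some (i : Int)
    else if cur = 0 ∧ next > 0 then
      (if pvWalk s i cur < 0 then some (i : Int) else none)
    else if cur = 0 ∧ next < 0 then
      (if pvWalk s i cur > 0 then some (i : Int) else none)
    else none
  match zci with
  | none => (next, zcs, lastSaved)
  | some z =>
    if lastSaved = none ∨ (lastSaved ≠ none ∧ min_gap = none) ∨
       (min_gap ≠ none ∧ (i : Int) - lastSaved.getD 0 > min_gap.getD 0) then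
      (next, zcs ++ [z], some z)
    else (next, zcs, lastSaved)

def calc_zero_crossings (s : List Int) (min_gap : Option Int) : List Int :=
  -- cur_pt = the first sample: Pre_ excludes the empty list, where Python raises IndexError
  ((List.range' 1 (s.length - 1)).foldl (pvStepA s min_gap) (s.getD 0 0, [], none)).2.1

-- ===== PORT B =====
-- one iteration of B's loop; state = (zero_crossings, last_saved, last_sign)
def pvStepB (min_gap : Option Int) (st : List Int × Option Int × Int)
    (p : Int × Int) : List Int × Option Int × Int :=
  let out := st.1; let lastSaved := st.2.1; let lastSign := st.2.2
  let i := p.1; let x := p.2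
  let r :=
    if lastSign ≠ 0 ∧ x * lastSign < 0 then
      if lastSaved = none ∨ min_gap = none ∨ i - lastSaved.getD 0 > min_gap.getD 0 then
        (out ++ [i], some i)
      else (out, lastSaved)
    else (out, lastSaved)
  (r.1, r.2, if x ≠ 0 then (if x > 0 then 1 else -1) else lastSign)

def calc_zero_crossings_alt (s : List Int) (min_gap : Option Int) : List Int :=
  ((PySem.List.enumerate s).foldl (pvStepB min_gap) ([], none, 0)).1

-- ===== PRECONDITION & SPEC =====
-- Python A indexes the first sample before its loop, raising IndexError on the empty list; nothing else raises.
def Pre_calc_zero_crossings (s : List Int) (min_gap : Option Int) : Prop := s ≠ []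
instance (s : List Int) (min_gap : Option Int) : Decidable (Pre_calc_zero_crossings s min_gap) := by
  unfold Pre_calc_zero_crossings; infer_instance
def pvWitness_calc_zero_crossings : List Int × Option Int := ([1, -2, 0, 3], some 1)


def Spec_calc_zero_crossings (s : List Int) (min_gap : Option Int) (out : List Int) : Prop := out = calc_zero_crossings_alt s min_gap
instance (s : List Int) (min_gap : Option Int) (out : List Int) : Decidable (Spec_calc_zero_crossings s min_gap out) := by unfold Spec_calc_zero_crossings; infer_instance

-- ===== CLAIM (what is proved, stated in full; the proofs are below) =====
def Claim_equal_calc_zero_crossings : Prop := ∀ (s : List Int) (min_gap : Option Int), Dom_calc_zero_crossings s min_gap → Pre_calc_zero_crossings s min_gap → Spec_calc_zero_crossings s min_gap (calc_zero_crossings s min_gap)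

-- ===== LEMMAS AND PROOFS =====

-- sign of x, the value B's last_sign holds once a nonzero sample was seen (0 before)
def pvSign (x : Int) : Int := if x = 0 then 0 else if x > 0 then 1 else -1

-- the A-side fold state before processing index i (i.e. after indices 1..i-1)
def pvFA (s : List Int) (min_gap : Option Int) (i : Nat) : Int × List Int × Option Int :=
  (List.range' 1 (i - 1)).foldl (pvStepA s min_gap) (s.getD 0 0, [], none)

-- the B-side fold state after the first i enumerate entries
def pvFB (s : List Int) (min_gap : Option Int) (i : Nat) : List Int × Option Int × Int :=
  (PySem.List.enumerate (s.take i)).foldl (pvStepB min_gap) ([], none, 0)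

theorem pvWalk_of_ne (s : List Int) (k : Nat) (t : Int) (h : t ≠ 0) : pvWalk s k t = t := by
  cases k <;> simp [pvWalk, h]

theorem pvWalk_succ (s : List Int) (i : Nat) :
    pvWalk s (i+1) 0 = if s.getD i 0 = 0 then pvWalk s i 0 else s.getD i 0 := by
  have h0 : pvWalk s (i+1) 0 = pvWalk s i (s.getD i 0) := by simp [pvWalk]
  rw [h0]
  by_cases h : s.getD i 0 = 0
  · rw [if_pos h, h]
  · rw [if_neg h, pvWalk_of_ne s i _ h]

theorem pvSign_mul_neg (x w : Int) :
    (pvSign w ≠ 0 ∧ x * pvSign w < 0) ↔ (w < 0 ∧ 0 < x) ∨ (0 < w ∧ x < 0) := by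
  unfold pvSign
  split_ifs with h1 h2 <;> simp [mul_one] <;> omega

theorem pvStep_eq (s : List Int) (min_gap : Option Int) (i : Nat) (hi : 1 ≤ i)
    (Z : List Int) (LS : Option Int) :
    pvStepA s min_gap (s.getD (i-1) 0, Z, LS) i
      = (s.getD i 0, (pvStepB min_gap (Z, LS, pvSign (pvWalk s i 0)) ((i : Int), s.getD i 0)).1,
         (pvStepB min_gap (Z, LS, pvSign (pvWalk s i 0)) ((i : Int), s.getD i 0)).2.1) ∧
    (pvStepB min_gap (Z, LS, pvSign (pvWalk s i 0)) ((i : Int), s.getD i 0)).2.2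
      = pvSign (pvWalk s (i+1) 0) := by
  have hi' : i - 1 + 1 = i := Nat.sub_add_cancel hi
  have hWc : s.getD (i-1) 0 ≠ 0 → pvWalk s i 0 = s.getD (i-1) 0 := by
    intro h
    conv_lhs => rw [← hi']
    rw [pvWalk_succ, if_neg h]
  -- A's three-way zero-crossing test equals B's sign test
  have hzci :
      (if (s.getD i 0 < 0 ∧ s.getD (i-1) 0 > 0) ∨ (s.getD i 0 > 0 ∧ s.getD (i-1) 0 < 0) then some ((i : Nat) : Int)
       else if s.getD (i-1) 0 = 0 ∧ s.getD i 0 > 0 then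
         (if pvWalk s i (s.getD (i-1) 0) < 0 then some ((i : Nat) : Int) else none)
       else if s.getD (i-1) 0 = 0 ∧ s.getD i 0 < 0 then
         (if pvWalk s i (s.getD (i-1) 0) > 0 then some ((i : Nat) : Int) else none)
       else none)
      = (if pvSign (pvWalk s i 0) ≠ 0 ∧ s.getD i 0 * pvSign (pvWalk s i 0) < 0
         then some ((i : Nat) : Int) else none) := by
    by_cases hc : s.getD (i-1) 0 = 0
    · rw [hc]
      simp only [pvSign_mul_neg]
      split_ifs <;> first | rfl | (exfalso; first | omega | (simp_all <;> omega) | simp_all)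
    · rw [hWc hc]
      simp only [pvSign_mul_neg]
      split_ifs <;> first | rfl | (exfalso; first | omega | (simp_all <;> omega) | simp_all)
  -- both save-conditions are equivalent
  have hsave : (LS = none ∨ (LS ≠ none ∧ min_gap = none) ∨
        (min_gap ≠ none ∧ (i : Int) - LS.getD 0 > min_gap.getD 0))
      ↔ (LS = none ∨ min_gap = none ∨ (i : Int) - LS.getD 0 > min_gap.getD 0) := by
    by_cases h1 : LS = none <;> by_cases h2 : min_gap = none <;> tauto
  have hW1 : pvWalk s (i+1) 0 = if s.getD i 0 = 0 then pvWalk s i 0 else s.getD i 0 :=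
    pvWalk_succ s i
  constructor
  · simp only [pvStepA, pvStepB]
    rw [hzci]
    by_cases hC : pvSign (pvWalk s i 0) ≠ 0 ∧ s.getD i 0 * pvSign (pvWalk s i 0) < 0
    · simp only [if_pos hC]
      by_cases hS : LS = none ∨ min_gap = none ∨ (i : Int) - LS.getD 0 > min_gap.getD 0
      · simp [if_pos hS, if_pos (hsave.mpr hS)]
      · simp [if_neg hS, if_neg (fun h => hS (hsave.mp h))]
    · rw [if_neg hC, if_neg hC]
  · simp only [pvStepB, hW1]
    by_cases h : s[i]?.getD 0 = (0 : Int)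
    · simp [h]
    · simp [h, pvSign]

theorem pvInv (s : List Int) (min_gap : Option Int) :
    ∀ i, 1 ≤ i → i ≤ s.length →
      pvFA s min_gap i = (s.getD (i-1) 0, (pvFB s min_gap i).1, (pvFB s min_gap i).2.1) ∧
      (pvFB s min_gap i).2.2 = pvSign (pvWalk s i 0) := by
  intro i hi
  induction i, hi using Nat.le_induction with
  | base =>
    intro hn
    cases s with
    | nil => simp at hn
    | cons a t =>
      constructor
      · simp [pvFA, pvFB, pvStepB, List.range']
      · by_cases h : a = 0 <;>
          simp [pvFB, pvStepB, pvWalk, pvSign, h]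
  | succ i hi ih =>
    intro hsn
    have hin : i ≤ s.length := by omega
    have hlt : i < s.length := by omega
    obtain ⟨ih1, ih2⟩ := ih hin
    have hFA : pvFA s min_gap (i+1) = pvStepA s min_gap (pvFA s min_gap i) i := by
      unfold pvFA
      have : (i + 1 - 1) = (i - 1) + 1 := by omega
      rw [this, List.range'_1_concat, List.foldl_append]
      have h1 : 1 + (i - 1) = i := by omega
      simp [h1]
    have hFB : pvFB s min_gap (i+1)
        = pvStepB min_gap (pvFB s min_gap i) ((i : Int), s.getD i 0) := by
      unfold pvFB
      rw [List.take_add_one, List.getElem?_eq_getElem hlt]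
      rw [PySem.List.enumerate_append, List.foldl_append]
      simp [PySem.List.enumerate_cons, PySem.List.enumerate_nil,
        List.length_take, Nat.min_eq_left hin, List.getD, List.getElem?_eq_getElem hlt]
    have hstep := pvStep_eq s min_gap i hi ((pvFB s min_gap i).1) ((pvFB s min_gap i).2.1)
    have hBst : pvFB s min_gap i
        = ((pvFB s min_gap i).1, (pvFB s min_gap i).2.1, pvSign (pvWalk s i 0)) := by
      rw [← ih2]
    rw [hFA, hFB, ih1, hBst]
    have h11 : i + 1 - 1 = i := by omega
    rw [h11]
    exact ⟨hstep.1, hstep.2⟩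

-- ===== VERDICT (by name: the statement is the Claim_ definition above) =====
theorem calc_zero_crossings_spec : Claim_equal_calc_zero_crossings := by
  intro s min_gap _ hpre
  have hn : 1 ≤ s.length := by
    cases s with
    | nil => exact absurd rfl hpre
    | cons a t => simp
  have h := pvInv s min_gap s.length hn le_rfl
  unfold Spec_calc_zero_crossings calc_zero_crossings calc_zero_crossings_alt
  have hA : ((List.range' 1 (s.length - 1)).foldl (pvStepA s min_gap) (s.getD 0 0, [], none))
      = pvFA s min_gap s.length := rfl
  have hB : (PySem.List.enumerate s) = PySem.List.enumerate (s.take s.length) := by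
    rw [List.take_length]
  rw [hA, hB, h.1]
  rfl
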